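-- pv_equiv track=rewrite | github.com/mikatabib/ProjectEuler | prob3.py | gpf
-- ===== SOURCE A (Python) =====
-- def gpf(n):
--     it = 2
--     m = float('-inf')
--     while it * it <= n:
--         if n % it:
--             it += 1
--         else:
--             n //= it
--             m = max(m, it)
--     m = max(m, n)
--     return m
-- ===== SOURCE B (Python) =====
-- def gpf(n):
--     if n < 4:
--         return n
--     d = 2
--     while n % d:
--         d = 3 if d == 2 else d + 2
--         if d * d > n:
--             return n
--     return gpf(n // d)
-- ===== Notes on version B (the rewrite author's own statement) =====
-- stated objective: alternative
-- what changed: B is recursive: it repeatedly finds the smallest divisor (testing 2 then only odd candidates) and recurses on the quotient, returning the final prime quotient, instead of A's single iterative scan that divides factors out in place while maintaining a running float('-inf') max accumulator.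
import Mathlib
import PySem

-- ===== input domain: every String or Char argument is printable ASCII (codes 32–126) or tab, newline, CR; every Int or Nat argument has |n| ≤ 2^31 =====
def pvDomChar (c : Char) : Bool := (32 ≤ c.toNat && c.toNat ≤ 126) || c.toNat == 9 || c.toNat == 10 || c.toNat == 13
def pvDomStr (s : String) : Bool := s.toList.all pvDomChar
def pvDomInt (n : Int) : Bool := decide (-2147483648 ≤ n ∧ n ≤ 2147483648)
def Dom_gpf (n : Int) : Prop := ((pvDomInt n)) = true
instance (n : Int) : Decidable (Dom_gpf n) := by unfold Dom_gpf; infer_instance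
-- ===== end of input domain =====

-- B recursively peels off the smallest divisor (testing 2 then odd candidates only) and
-- recurses on the quotient, with no max accumulator, instead of A's single iterative
-- divide-in-place scan with a running float('-inf') max; alternative structure, same cost.

-- side conditions cited by name inside the ports (keeps the definitions' proof terms small)
lemma gpf_ediv_lt (n d : Int) (hn : 0 < n) (hd : 1 < d) : n / d < n := by
  have h1 : n / d * d ≤ n := Int.ediv_mul_le n (by omega)
  have h2 : 0 ≤ n / d := Int.ediv_nonneg (by omega) (by omega)
  have h3 : n / d * 2 ≤ n / d * d := mul_le_mul_of_nonneg_left (by omega) h2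
  omega

lemma gpf_step {it : Int} (h : 2 ≤ it) : 2 ≤ it + 1 := by omega

lemma gpf_two : (2:Int) ≤ 2 := le_refl 2

lemma gpf_sq_ge {it : Int} (h : 2 ≤ it) : 2 * it ≤ it * it :=
  mul_le_mul_of_nonneg_right h (by omega)

lemma gpf_decA1 {it n : Int} (h : 2 ≤ it) (hg : it * it ≤ n) :
    (n - (it + 1)).toNat < (n - it).toNat := by
  have h2 := gpf_sq_ge h
  omega

lemma gpf_decA2 {it n : Int} (h : 2 ≤ it) (hg : it * it ≤ n) :
    (PySem.Int.floordiv n it - it).toNat < (n - it).toNat := by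
  have hitpos : (0:Int) < it := by omega
  have h2 := gpf_sq_ge h
  have hn : (0:Int) < n := by omega
  rw [PySem.Int.floordiv_eq_ediv_of_pos hitpos]
  have hlt : n / it < n := gpf_ediv_lt n it hn (by omega)
  omega

-- ===== PORT A =====
-- Python's m = float('-inf') is modeled as Option Int (none = -inf): max(-inf, x) = x,
-- and after the first update m is an Int; exact since -inf is below every Int.
def gpfOmax (m : Option Int) (x : Int) : Int :=
  match m with
  | none => x
  | some a => max a x

def gpfLoopA (it n : Int) (m : Option Int) (h : 2 ≤ it) : Int :=
  if hg : it * it ≤ n then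
    if hmod : PySem.Int.mod n it ≠ 0 then
      gpfLoopA (it + 1) n m (gpf_step h)
    else
      gpfLoopA it (PySem.Int.floordiv n it) (some (gpfOmax m it)) h
  else
    gpfOmax m n
termination_by (n - it).toNat
decreasing_by
· exact gpf_decA1 h hg
· exact gpf_decA2 h hg

def gpf (n : Int) : Int := gpfLoopA 2 n none gpf_two

-- ===== PORT B =====
-- 'd = 3 if d == 2 else d + 2'
def gpfStep (d : Int) : Int := if d = 2 then 3 else d + 2

lemma gpfStep_two_le {d : Int} (h : 2 ≤ d) : 2 ≤ gpfStep d := by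
  unfold gpfStep; split <;> omega

lemma gpfStep_gt {d : Int} (h : 2 ≤ d) : d < gpfStep d := by
  unfold gpfStep; split <;> omega

-- 'while n % d: d = 3 if d == 2 else d + 2; if d * d > n: return n'
-- returns .inl n (the function returned n: no divisor up to sqrt) or .inr d (loop exited: d divides n)
lemma gpfFind_pre {n d : Int} (h : 2 ≤ d ∧ d * d ≤ n)
    (hgt : ¬ n < gpfStep d * gpfStep d) :
    2 ≤ gpfStep d ∧ gpfStep d * gpfStep d ≤ n := ⟨gpfStep_two_le h.1, by omega⟩

lemma gpfFind_dec {n d : Int} (h : 2 ≤ d ∧ d * d ≤ n)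
    (hgt : ¬ n < gpfStep d * gpfStep d) :
    (n - gpfStep d).toNat < (n - d).toNat := by
  have h1 := gpfStep_gt h.1
  have h2 := gpf_sq_ge (gpfStep_two_le h.1)
  omega

-- .inr carries the loop-exit facts the outer recursion's termination needs (proof decoration only)
def gpfFind (n d : Int) (h : 2 ≤ d ∧ d * d ≤ n) :
    Int ⊕ {e : Int // 2 ≤ e ∧ e * e ≤ n ∧ PySem.Int.mod n e = 0} :=
  if hm : PySem.Int.mod n d ≠ 0 then
    if hgt : n < gpfStep d * gpfStep d then Sum.inl n
    else gpfFind n (gpfStep d) (gpfFind_pre h hgt)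
  else Sum.inr ⟨d, h.1, h.2, not_not.mp hm⟩
termination_by (n - d).toNat
decreasing_by
  exact gpfFind_dec h hgt

lemma gpf_alt_pre {n : Int} (h4 : ¬ n < 4) : 2 ≤ (2:Int) ∧ (2:Int) * 2 ≤ n :=
  ⟨le_refl 2, by omega⟩

lemma gpf_alt_dec {n d : Int} (h2 : 2 ≤ d) (hsq : d * d ≤ n) :
    (PySem.Int.floordiv n d).toNat < n.toNat := by
  have hpos : (0:Int) < d := by omega
  have hn : (0:Int) < n := lt_of_lt_of_le (by have := gpf_sq_ge h2; omega) hsq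
  rw [PySem.Int.floordiv_eq_ediv_of_pos hpos]
  have hlt : n / d < n := gpf_ediv_lt n d hn (by omega)
  have hge : 0 ≤ n / d := Int.ediv_nonneg (by omega) (by omega)
  omega

def gpf_alt (n : Int) : Int :=
  if h4 : n < 4 then n
  else
    match hf : gpfFind n 2 (gpf_alt_pre h4) with
    | Sum.inl r => r
    | Sum.inr d => gpf_alt (PySem.Int.floordiv n d.1)
termination_by n.toNat
decreasing_by
  exact gpf_alt_dec d.2.1 d.2.2.1

-- ===== PRECONDITION & SPEC =====
def Spec_gpf (n : Int) (out : Int) : Prop := out = gpf_alt n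
instance (n : Int) (out : Int) : Decidable (Spec_gpf n out) := by unfold Spec_gpf; infer_instance

-- ===== CLAIM (what is proved, stated in full; the proofs are below) =====
def Claim_equal_gpf : Prop := ∀ (n : Int), Dom_gpf n → Spec_gpf n (gpf n)

-- ===== LEMMAS AND PROOFS =====

-- the greatest prime factor (1 when there is none), the common reference value
def pvFn (k : ℕ) : ℕ := k.primeFactors.max.getD 1

lemma pvFn_one : pvFn 1 = 1 := by
  unfold pvFn
  rw [Nat.primeFactors_one, Finset.max_empty]
  rfl

lemma pvFn_prime {p : ℕ} (hp : p.Prime) : pvFn p = p := by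
  unfold pvFn
  rw [hp.primeFactors, Finset.max_singleton]
  rfl

lemma pvFn_mul {p m : ℕ} (hp : p.Prime) (hm : m ≠ 0) : pvFn (p * m) = max p (pvFn m) := by
  unfold pvFn
  rw [Nat.primeFactors_mul hp.ne_zero hm, hp.primeFactors]
  cases hmax : m.primeFactors.max with
  | bot =>
    rw [Finset.max_union, hmax, Finset.max_singleton]
    have h2 := hp.two_le
    rw [sup_bot_eq]
    show p = max p 1
    omega
  | coe b =>
    rw [Finset.max_union, hmax, Finset.max_singleton, ← WithBot.coe_sup]
    show max p b = _
    rfl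

lemma pvFn_ge_of_mem {q k : ℕ} (h : q ∈ k.primeFactors) : q ≤ pvFn k := by
  have hle := Finset.le_max h
  unfold pvFn
  cases hmax : k.primeFactors.max with
  | bot => rw [hmax] at hle; exact absurd hle (by simp)
  | coe b => rw [hmax] at hle; simpa using hle

lemma prime_of_no_small (k d : ℕ) (hk : 2 ≤ k) (hlt : k < d * d)
    (hinv : ∀ p : ℕ, 2 ≤ p → p < d → ¬ p ∣ k) : k.Prime := by
  by_contra hnp
  have hmf := Nat.minFac_prime (by omega : k ≠ 1)
  have hdvd := Nat.minFac_dvd k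
  have hsq : k.minFac * k.minFac ≤ k := by
    have := Nat.minFac_sq_le_self (by omega) hnp
    nlinarith [this]
  have h2 := hmf.two_le
  have hd : k.minFac < d := by nlinarith
  exact hinv k.minFac h2 hd hdvd

lemma prime_of_min_divisor (k d : ℕ) (hd : 2 ≤ d) (hdvd : d ∣ k)
    (hinv : ∀ p : ℕ, 2 ≤ p → p < d → ¬ p ∣ k) : d.Prime := by
  by_contra hnp
  have hmf := Nat.minFac_prime (by omega : d ≠ 1)
  have hlt : d.minFac < d := by
    rcases lt_or_eq_of_le (Nat.minFac_le (by omega : 0 < d)) with h | h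
    · exact h
    · exact absurd (h ▸ hmf) hnp
  exact hinv d.minFac hmf.two_le hlt ((Nat.minFac_dvd d).trans hdvd)

-- bridge: an Int no-small-divisor invariant transfers to toNat
lemma inv_toNat {n d : Int} (hn : 1 ≤ n)
    (hinv : ∀ p : Int, 2 ≤ p → p < d → ¬ p ∣ n) :
    ∀ p : ℕ, 2 ≤ p → (p : Int) < d → ¬ p ∣ n.toNat := by
  intro p h2 hlt hpd
  apply hinv p (by exact_mod_cast h2) hlt
  have : (p : Int) ∣ (n.toNat : Int) := Int.natCast_dvd_natCast.mpr hpd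
  rwa [Int.toNat_of_nonneg (by omega)] at this

-- A's loop: under the no-small-divisor invariant it computes max(m, greatest prime factor)
lemma gpfA_main (it n : Int) (m : Option Int) (h : 2 ≤ it) :
    1 ≤ n → (∀ p : Int, 2 ≤ p → p < it → ¬ p ∣ n) →
      gpfLoopA it n m h = gpfOmax m ((pvFn n.toNat : ℕ) : Int) := by
  fun_induction gpfLoopA it n m h with
  | case1 it n m h hg hmod ih =>
    intro hn hinv
    apply ih hn
    intro p hp2 hplt hpd
    rcases lt_or_eq_of_le (Int.lt_add_one_iff.mp hplt) with h' | h'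
    · exact hinv p hp2 h' hpd
    · subst h'
      exact hmod ((PySem.Int.mod_eq_zero_iff_dvd n p).mpr hpd)
  | case2 it n m h hg hmod ih =>
    intro hn hinv
    have hmod' := not_not.mp hmod
    have hitpos : (0:Int) < it := by omega
    have hdvd : it ∣ n := (PySem.Int.mod_eq_zero_iff_dvd n it).mp hmod'
    have hfe : PySem.Int.floordiv n it = n / it := PySem.Int.floordiv_eq_ediv_of_pos hitpos
    have hmul : it * (PySem.Int.floordiv n it) = n := by
      rw [hfe]; exact Int.mul_ediv_cancel' hdvd
    have hn' : 1 ≤ PySem.Int.floordiv n it := by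
      rw [hfe]
      have : it ≤ n := Int.le_of_dvd (by omega) hdvd
      have := (Int.le_ediv_iff_mul_le hitpos).mpr (by omega : 1 * it ≤ n)
      omega
    have hinv' : ∀ p : Int, 2 ≤ p → p < it → ¬ p ∣ PySem.Int.floordiv n it := by
      intro p hp2 hplt hpd
      exact hinv p hp2 hplt (hpd.trans ⟨it, by rw [mul_comm]; exact hmul.symm⟩)
    rw [ih hn' hinv']
    -- it is prime, and pvFn n = max it (pvFn (n/it))
    have hprime : it.toNat.Prime := by
      apply prime_of_min_divisor n.toNat it.toNat (by omega)
      · have hc : ((it.toNat : ℤ)) ∣ ((n.toNat : ℤ)) := by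
          rw [Int.toNat_of_nonneg (by omega : (0:Int) ≤ it),
              Int.toNat_of_nonneg (by omega : (0:Int) ≤ n)]
          exact hdvd
        exact_mod_cast hc
      · intro p h2 hlt
        exact inv_toNat hn hinv p h2 (by omega)
    have hsplit : n.toNat = it.toNat * (PySem.Int.floordiv n it).toNat := by
      have : ((n.toNat : ℤ)) = ((it.toNat * (PySem.Int.floordiv n it).toNat : ℕ) : ℤ) := by
        push_cast
        rw [Int.toNat_of_nonneg (by omega : (0:Int) ≤ n),
            Int.toNat_of_nonneg (by omega : (0:Int) ≤ it),
            Int.toNat_of_nonneg (by omega : (0:Int) ≤ PySem.Int.floordiv n it)]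
        omega
      exact_mod_cast this
    rw [hsplit, pvFn_mul hprime (by omega : (PySem.Int.floordiv n it).toNat ≠ 0)]
    have hit : ((it.toNat : ℤ)) = it := Int.toNat_of_nonneg (by omega)
    have hcast : ((max it.toNat (pvFn (PySem.Int.floordiv n it).toNat) : ℕ) : ℤ)
        = max it ((pvFn (PySem.Int.floordiv n it).toNat : ℕ) : ℤ) := by
      push_cast
      rw [hit]
    rw [hcast]
    cases m with
    | none => simp [gpfOmax]
    | some a => simp [gpfOmax, max_assoc]
  | case3 it n m h hg =>
    intro hn hinv
    have hx : ((pvFn n.toNat : ℕ) : Int) = n := by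
      rcases eq_or_lt_of_le hn with h1 | h2
      · rw [← h1]; norm_num [pvFn_one]
      · have hprime : n.toNat.Prime := by
          apply prime_of_no_small n.toNat it.toNat (by omega)
          · have : n < it * it := by omega
            have hnn : (0:Int) ≤ n := by omega
            have hii : (0:Int) ≤ it := by omega
            zify
            rw [Int.toNat_of_nonneg hnn, Int.toNat_of_nonneg hii]
            exact this
          · intro p hp2 hlt
            exact inv_toNat hn hinv p hp2 (by omega)
        rw [pvFn_prime hprime, Int.toNat_of_nonneg (by omega)]
    rw [hx]

-- invariant extension: no divisor < d, d does not divide, d of the scanned shape ⇒ no divisor < gpfStep d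
lemma gpf_ext {n d : Int} (hn : 1 ≤ n)
    (hinv : ∀ p : Int, 2 ≤ p → p < d → ¬ p ∣ n)
    (hshape : d = 2 ∨ (3 ≤ d ∧ d % 2 = 1))
    (hnd : ¬ d ∣ n) :
    ∀ p : Int, 2 ≤ p → p < gpfStep d → ¬ p ∣ n := by
  intro p hp2 hplt hpd
  rcases hshape with h2 | ⟨h3, hodd⟩
  · subst h2
    unfold gpfStep at hplt
    norm_num at hplt
    have hp : p = 2 := by omega
    exact hnd (hp ▸ hpd)
  · have hne : d ≠ 2 := by omega
    simp only [gpfStep, if_neg hne] at hplt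
    rcases (by omega : p < d ∨ p = d ∨ p = d + 1) with h | h | h
    · exact hinv p hp2 h hpd
    · exact hnd (h ▸ hpd)
    · have h2p : (2:Int) ∣ p := by omega
      exact hinv 2 (by omega) (by omega) (h2p.trans hpd)

lemma gpf_shape_step {d : Int} (hshape : d = 2 ∨ (3 ≤ d ∧ d % 2 = 1)) :
    gpfStep d = 2 ∨ (3 ≤ gpfStep d ∧ gpfStep d % 2 = 1) := by
  rcases hshape with h2 | ⟨h3, hodd⟩
  · subst h2; right; unfold gpfStep; norm_num
  · right; simp only [gpfStep, if_neg (by omega : d ≠ 2)]; omega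

-- B's divisor search: it returns either (n is prime) or the least prime divisor of n
lemma gpfFind_spec (n d : Int) (h : 2 ≤ d ∧ d * d ≤ n) :
    (∀ p : Int, 2 ≤ p → p < d → ¬ p ∣ n) →
    (d = 2 ∨ (3 ≤ d ∧ d % 2 = 1)) →
    (∀ r, gpfFind n d h = Sum.inl r → r = n ∧ n.toNat.Prime) ∧
    (∀ e, gpfFind n d h = Sum.inr e →
        e.1 ∣ n ∧ e.1.toNat.Prime ∧ ∀ p : Int, 2 ≤ p → p < e.1 → ¬ p ∣ n) := by
  fun_induction gpfFind n d h with
  | case1 d h hm hgt =>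
    -- returned n: no divisor below gpfStep d and n < (gpfStep d)^2, so n is prime
    intro hinv hshape
    have hn : 1 ≤ n := by nlinarith [h.1, h.2]
    have hn4 : 4 ≤ n := by nlinarith [h.1, h.2]
    have hnd : ¬ d ∣ n := fun hdvd => hm ((PySem.Int.mod_eq_zero_iff_dvd n d).mpr hdvd)
    have hext := gpf_ext hn hinv hshape hnd
    have hs2 := gpfStep_two_le h.1
    constructor
    · intro r he
      injection he with he'
      subst he'
      refine ⟨rfl, ?_⟩
      apply prime_of_no_small n.toNat (gpfStep d).toNat (by omega)
      · have hcast : ((n.toNat : ℤ)) < ((gpfStep d).toNat : ℤ) * ((gpfStep d).toNat : ℤ) := by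
          rw [Int.toNat_of_nonneg (by omega : (0:Int) ≤ n),
              Int.toNat_of_nonneg (by omega : (0:Int) ≤ gpfStep d)]
          exact hgt
        exact_mod_cast hcast
      · intro p hp2 hplt
        apply inv_toNat hn hext p hp2
        have : ((gpfStep d).toNat : ℤ) = gpfStep d := Int.toNat_of_nonneg (by omega)
        omega
    · intro e he
      cases he
  | case2 d h hm hgt ih =>
    intro hinv hshape
    have hn : 1 ≤ n := by nlinarith [h.1, h.2]
    have hnd : ¬ d ∣ n := fun hdvd => hm ((PySem.Int.mod_eq_zero_iff_dvd n d).mpr hdvd)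
    exact ih (gpf_ext hn hinv hshape hnd) (gpf_shape_step hshape)
  | case3 d h hm =>
    intro hinv hshape
    have hn : 1 ≤ n := by nlinarith [h.1, h.2]
    constructor
    · intro r he
      cases he
    · intro e he
      injection he with he'
      subst he'
      have hdvd : d ∣ n := (PySem.Int.mod_eq_zero_iff_dvd n d).mp (not_not.mp hm)
      show d ∣ n ∧ d.toNat.Prime ∧ _
      refine ⟨hdvd, ?_, hinv⟩
      apply prime_of_min_divisor n.toNat d.toNat (by omega)
      · have hc : ((d.toNat : ℤ)) ∣ ((n.toNat : ℤ)) := by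
          rw [Int.toNat_of_nonneg (by omega : (0:Int) ≤ d),
              Int.toNat_of_nonneg (by omega : (0:Int) ≤ n)]
          exact hdvd
        exact_mod_cast hc
      · intro p hp2 hplt
        apply inv_toNat hn hinv p hp2
        have : ((d.toNat : ℤ)) = d := Int.toNat_of_nonneg (by omega)
        omega


-- B's recursion computes the greatest prime factor for n ≥ 1
lemma gpfB_main (n : Int) : 1 ≤ n → gpf_alt n = ((pvFn n.toNat : ℕ) : Int) := by
  fun_induction gpf_alt n with
  | case1 n h4 =>
    intro hn
    have h3 : n = 1 ∨ n = 2 ∨ n = 3 := by omega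
    rcases h3 with h | h | h <;> subst h
    · rw [show ((1:Int).toNat) = 1 from rfl, pvFn_one]; rfl
    · rw [show ((2:Int).toNat) = 2 from rfl, pvFn_prime Nat.prime_two]; rfl
    · rw [show ((3:Int).toNat) = 3 from rfl, pvFn_prime Nat.prime_three]; rfl
  | case2 n h4 r hf =>
    intro hn
    obtain ⟨hrn, hprime⟩ :=
      (gpfFind_spec n 2 (gpf_alt_pre h4)
        (fun p hp2 hplt => absurd hplt (by omega)) (Or.inl rfl)).1 r hf
    subst hrn
    rw [pvFn_prime hprime, Int.toNat_of_nonneg (by omega)]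
  | case3 n h4 e hf ih =>
    intro hn
    obtain ⟨e, h2e, hsq, hmode⟩ := e
    obtain ⟨hdvd, hprime, hinv⟩ :=
      (gpfFind_spec n 2 (gpf_alt_pre h4)
        (fun p hp2 hplt => absurd hplt (by omega)) (Or.inl rfl)).2 ⟨e, h2e, hsq, hmode⟩ hf
    have ih' : 1 ≤ PySem.Int.floordiv n e →
        gpf_alt (PySem.Int.floordiv n e) = ((pvFn (PySem.Int.floordiv n e).toNat : ℕ) : Int) := ih
    show gpf_alt (PySem.Int.floordiv n e) = ((pvFn n.toNat : ℕ) : Int)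
    have hepos : (0:Int) < e := by omega
    have hfe : PySem.Int.floordiv n e = n / e := PySem.Int.floordiv_eq_ediv_of_pos hepos
    have hqe : e ≤ PySem.Int.floordiv n e := by
      rw [hfe]
      exact (Int.le_ediv_iff_mul_le hepos).mpr hsq
    have hq2 : 2 ≤ PySem.Int.floordiv n e := by omega
    have hmul : e * PySem.Int.floordiv n e = n := by
      rw [hfe]; exact Int.mul_ediv_cancel' hdvd
    have hsplit : n.toNat = e.toNat * (PySem.Int.floordiv n e).toNat := by
      have hc : ((n.toNat : ℤ)) = ((e.toNat * (PySem.Int.floordiv n e).toNat : ℕ) : ℤ) := by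
        push_cast
        rw [Int.toNat_of_nonneg (by omega : (0:Int) ≤ n),
            Int.toNat_of_nonneg (by omega : (0:Int) ≤ e),
            Int.toNat_of_nonneg (by omega : (0:Int) ≤ PySem.Int.floordiv n e)]
        omega
      exact_mod_cast hc
    rw [hsplit, pvFn_mul hprime (by omega : (PySem.Int.floordiv n e).toNat ≠ 0)]
    have hqd : (PySem.Int.floordiv n e).toNat ∣ n.toNat := by
      rw [hsplit]; exact dvd_mul_left _ _
    have hple : e.toNat ≤ pvFn (PySem.Int.floordiv n e).toNat := by
      have hq1 : (PySem.Int.floordiv n e).toNat ≠ 1 := by omega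
      have hp0 : (PySem.Int.floordiv n e).toNat.minFac.Prime := Nat.minFac_prime hq1
      have hmem : (PySem.Int.floordiv n e).toNat.minFac ∈
          (PySem.Int.floordiv n e).toNat.primeFactors :=
        Nat.mem_primeFactors.mpr ⟨hp0, Nat.minFac_dvd _, by omega⟩
      have hbig : ¬ (((PySem.Int.floordiv n e).toNat.minFac : ℤ)) < e := by
        intro hlt
        exact inv_toNat (by omega) hinv _ hp0.two_le hlt
          ((Nat.minFac_dvd _).trans hqd)
      have hcast : ((e.toNat : ℤ)) = e := Int.toNat_of_nonneg (by omega)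
      have h1 : e.toNat ≤ (PySem.Int.floordiv n e).toNat.minFac := by omega
      exact h1.trans (pvFn_ge_of_mem hmem)
    rw [max_eq_right hple]
    exact ih' (by omega)

-- ===== VERDICT (by name: the statement is the Claim_ definition above) =====
theorem gpf_spec : Claim_equal_gpf := by
  intro n _
  unfold Spec_gpf
  by_cases hn : 1 ≤ n
  · rw [gpfB_main n hn]
    unfold gpf
    rw [gpfA_main 2 n none gpf_two hn (by intro p h1 h2 _; omega)]
    rfl
  · unfold gpf
    rw [gpfLoopA.eq_def, dif_neg (by omega : ¬ (2:Int) * 2 ≤ n)]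
    rw [gpf_alt.eq_def, dif_pos (by omega : n < 4)]
    rfl
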